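-- pv_equiv track=rewrite | github.com/forestnoobie/RWNN-optimization | utils_kyy/utils_graycode_v2.py | graydecode
-- ===== SOURCE A (Python) =====
-- def graydecode(binary):
--     # binary -> decimal
--
--     binary1 = binary
--     decimal, i, n = 0, 0, 0
--     while (binary != 0):
--         dec = binary % 10
--         decimal = decimal + dec * pow(2, i)
--         binary = binary // 10
--         i += 1
--
--     # Taking xor until
--     # n becomes zero
--     inv = 0
--     while (decimal):
--         inv = inv ^ decimal;
--         decimal = decimal >> 1;
--
--     return inv
-- ===== SOURCE B (Python) =====
-- def graydecode(binary):
--     # Recursive re-implementation: digit-value by recursion on the decimal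
--     # digits (no running power accumulator), then gray-decode by structural
--     # recursion on the bits, rebuilding each decoded bit from the decoded
--     # upper half instead of XOR-ing repeated full-width shifts.
--     def val(b):
--         if b == 0:
--             return 0
--         return b % 10 + 2 * val(b // 10)
--
--     def dec(n):
--         if n == 0:
--             return 0
--         d = dec(n // 2)
--         return 2 * d + ((n ^ d) % 2)
--
--     return dec(val(binary))
-- ===== Notes on version B (the rewrite author's own statement) =====
-- stated objective: alternative
-- what changed: Replaces A's two imperative accumulator loops by structural recursions: the digit loop with explicit counter and pow(2,i) becomes a direct recursion b%10 + 2*val(b//10), and the gray decode's repeated full-width shift-and-XOR accumulation becomes a recursion on the bits that rebuilds each decoded bit from the decoded upper half via 2*d + ((n^d)%2).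
import Mathlib
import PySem

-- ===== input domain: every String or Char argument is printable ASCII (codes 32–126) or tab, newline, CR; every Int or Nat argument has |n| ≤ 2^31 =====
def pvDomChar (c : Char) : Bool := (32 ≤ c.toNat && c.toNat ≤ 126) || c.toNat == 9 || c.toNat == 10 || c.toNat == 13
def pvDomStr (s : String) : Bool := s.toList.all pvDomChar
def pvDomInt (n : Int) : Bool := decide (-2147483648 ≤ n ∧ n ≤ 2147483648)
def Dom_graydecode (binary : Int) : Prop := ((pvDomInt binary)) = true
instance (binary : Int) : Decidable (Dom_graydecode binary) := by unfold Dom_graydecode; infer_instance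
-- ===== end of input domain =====

-- B replaces A's two accumulator loops with structural recursions (digit value and
-- per-bit gray decode); alternative decomposition, same asymptotic cost.


-- termination helper for the positive-dividend loops (cited by the ports' decreasing_by)
theorem pv_toNat_div_lt (a b : Int) (h : 0 < a) (hb : 1 < b) : (a / b).toNat < a.toNat := by
  have h2 : ((a.toNat : Int)) = a := by omega
  have hb2 : ((b.toNat : Int)) = b := by omega
  have h3 : a / b = ((a.toNat / b.toNat : Nat) : Int) := by
    rw [← h2, ← hb2]
    exact_mod_cast (Int.natCast_div a.toNat b.toNat).symm
  have h4 : a.toNat / b.toNat < a.toNat := Nat.div_lt_self (by omega) (by omega)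
  omega

-- ===== PORT A =====
-- first while loop: decimal-digit to binary value accumulation.
-- Loop guard is `binary ≠ 0` in Python; for binary < 0 Python never terminates
-- (binary // 10 stalls at -1), so the port returns on `0 < binary` only —
-- the negative case is excluded by Pre_graydecode.
def pyLoop1 (binary decimal : Int) (i : Nat) : Int :=
  if h : 0 < binary then
    pyLoop1 (PySem.Int.floordiv binary 10) (decimal + PySem.Int.mod binary 10 * 2 ^ i) (i + 1)
  else decimal
termination_by binary.toNat
decreasing_by
  rw [PySem.Int.floordiv_eq_ediv_of_pos (by omega)]
  exact pv_toNat_div_lt binary 10 h (by omega)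

-- second while loop: inv ^= decimal; decimal >>= 1.  Guard is truthiness
-- (decimal ≠ 0); for decimal < 0 Python never terminates (-1 >> 1 = -1),
-- unreachable under Pre_graydecode.
def pyLoop2 (decimal inv : Int) : Int :=
  if h : 0 < decimal then
    pyLoop2 (decimal >>> (1 : Nat)) (PySem.Int.bxor inv decimal)
  else inv
termination_by decimal.toNat
decreasing_by
  have h1 : decimal >>> (1 : Nat) = decimal / 2 := by
    simp [Int.shiftRight_eq_div_pow]
  rw [h1]
  exact pv_toNat_div_lt decimal 2 h (by omega)

def graydecode (binary : Int) : Int :=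
  -- binary1 and n are assigned but never used in A
  pyLoop2 (pyLoop1 binary 0 0) 0

-- ===== PORT B =====
-- val(b): digit value by recursion; same divergence guard as A's first loop.
def bVal (b : Int) : Int :=
  if h : 0 < b then PySem.Int.mod b 10 + 2 * bVal (PySem.Int.floordiv b 10) else 0
termination_by b.toNat
decreasing_by
  rw [PySem.Int.floordiv_eq_ediv_of_pos (by omega)]
  exact pv_toNat_div_lt b 10 h (by omega)

-- dec(n): structural recursion on the bits.  dec only ever receives
-- val(binary) ≥ 0, so it is ported on Nat (exact for that argument).
def bDec (n : Nat) : Nat :=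
  if n = 0 then 0
  else
    let d := bDec (n / 2)
    2 * d + ((n ^^^ d) % 2)
decreasing_by exact Nat.div_lt_self (by omega) (by omega)

def graydecode_alt (binary : Int) : Int :=
  Int.ofNat (bDec (bVal binary).toNat)

-- ===== PRECONDITION & SPEC =====
-- Pre_ excludes negative inputs: on them Python A loops forever (binary // 10
-- stalls at -1), so A never returns there.
def Pre_graydecode (binary : Int) : Prop := 0 ≤ binary
instance (binary : Int) : Decidable (Pre_graydecode binary) := by unfold Pre_graydecode; infer_instance
def pvWitness_graydecode : Int := (10)

def Spec_graydecode (binary : Int) (out : Int) : Prop := out = graydecode_alt binary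
instance (binary : Int) (out : Int) : Decidable (Spec_graydecode binary out) := by unfold Spec_graydecode; infer_instance

-- ===== CLAIM (what is proved, stated in full; the proofs are below) =====
def Claim_equal_graydecode : Prop := ∀ (binary : Int), Dom_graydecode binary → Pre_graydecode binary → Spec_graydecode binary (graydecode binary)

-- ===== LEMMAS AND PROOFS =====

theorem bVal_nonneg (b : Int) : 0 ≤ bVal b := by
  induction b using bVal.induct with
  | case1 b h ih =>
      rw [bVal, dif_pos h]
      have hm : 0 ≤ PySem.Int.mod b 10 := by
        rw [PySem.Int.mod_eq_emod_of_pos (by omega)]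
        have := Int.emod_nonneg b (by omega : (10:Int) ≠ 0)
        omega
      omega
  | case2 b h => rw [bVal, dif_neg h]

theorem loop1_eq_bVal (b : Int) : ∀ (d : Int) (i : Nat), pyLoop1 b d i = d + 2 ^ i * bVal b := by
  induction b using bVal.induct with
  | case1 b h ih =>
      intro d i
      rw [pyLoop1, dif_pos h, bVal, dif_pos h, ih]
      ring
  | case2 b h =>
      intro d i
      rw [pyLoop1, dif_neg h, bVal, dif_neg h]
      ring

-- Nat model of A's second loop
def loop2N (n inv : Nat) : Nat :=
  if n = 0 then inv else loop2N (n / 2) (inv ^^^ n)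
decreasing_by exact Nat.div_lt_self (by omega) (by omega)

theorem pyLoop2_eq_loop2N (n : Nat) : ∀ (inv : Nat), pyLoop2 (n : Int) (inv : Int) = ((loop2N n inv : Nat) : Int) := by
  induction n using Nat.strong_induction_on with
  | _ n ih =>
      intro inv
      by_cases h : n = 0
      · subst h
        rw [pyLoop2, dif_neg (by omega), loop2N, if_pos rfl]
      · rw [pyLoop2, dif_pos (by exact_mod_cast Nat.pos_of_ne_zero h), loop2N, if_neg h]
        have hs : ((n : Nat) : Int) >>> (1 : Nat) = ((n / 2 : Nat) : Int) := by
          simp [Int.shiftRight_eq_div_pow]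
        have hx : PySem.Int.bxor ((inv : Nat) : Int) ((n : Nat) : Int) = ((inv ^^^ n : Nat) : Int) :=
          PySem.Int.bxor_natCast inv n
        rw [hs, hx, ih (n / 2) (Nat.div_lt_self (by omega) (by omega))]

theorem xor_div_two (a b : Nat) : (a ^^^ b) / 2 = a / 2 ^^^ b / 2 := by
  apply Nat.eq_of_testBit_eq
  intro i
  simp [Nat.testBit_div_two, Nat.testBit_xor]

theorem bDec_succ (m : Nat) (h : m ≠ 0) :
    bDec m = 2 * bDec (m / 2) + ((m ^^^ bDec (m / 2)) % 2) := by
  rw [bDec, if_neg h]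

-- the key invariant of B's recursion: XOR-ing n back onto dec(n) shifted down gives dec(n)
theorem bDec_key (m : Nat) : m ^^^ (bDec m / 2) = bDec m := by
  induction m using Nat.strong_induction_on with
  | _ m ih =>
      by_cases h : m = 0
      · subst h; simp [bDec]
      · rw [bDec_succ m h]
        have hp : (m ^^^ bDec (m / 2)) % 2 < 2 := Nat.mod_lt _ (by omega)
        have hdiv : (2 * bDec (m / 2) + (m ^^^ bDec (m / 2)) % 2) / 2 = bDec (m / 2) := by omega
        rw [hdiv]
        have hx : (m ^^^ bDec (m / 2)) / 2 = bDec (m / 2) := by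
          rw [xor_div_two]
          exact ih (m / 2) (Nat.div_lt_self (by omega) (by omega))
        omega

theorem loop2N_eq_bDec (n : Nat) : ∀ (inv : Nat), loop2N n inv = inv ^^^ bDec n := by
  induction n using Nat.strong_induction_on with
  | _ n ih =>
      intro inv
      by_cases h : n = 0
      · subst h
        rw [loop2N, if_pos rfl]
        simp [bDec]
      · rw [loop2N, if_neg h, ih (n / 2) (Nat.div_lt_self (by omega) (by omega))]
        have h2 : bDec n / 2 = bDec (n / 2) := by
          rw [bDec_succ n h]
          have : (n ^^^ bDec (n / 2)) % 2 < 2 := Nat.mod_lt _ (by omega)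
          omega
        have h1 : n ^^^ bDec (n / 2) = bDec n := by
          have := bDec_key n
          rw [h2] at this
          exact this
        rw [Nat.xor_assoc, h1]

-- ===== VERDICT (by name: the statement is the Claim_ definition above) =====
theorem graydecode_spec : Claim_equal_graydecode := by
  intro binary _ hpre
  unfold Spec_graydecode graydecode graydecode_alt
  rw [loop1_eq_bVal]
  have hv : 0 ≤ bVal binary := bVal_nonneg binary
  have hcast : (0 : Int) + 2 ^ 0 * bVal binary = ((bVal binary).toNat : Int) := by
    have : (0 : Int) + 2 ^ 0 * bVal binary = bVal binary := by ring
    omega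
  rw [hcast]
  have h0 : (0 : Int) = ((0 : Nat) : Int) := rfl
  rw [h0, pyLoop2_eq_loop2N, loop2N_eq_bDec]
  simp [Int.ofNat_eq_natCast]
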